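-- pv_equiv track=rewrite | github.com/jensdebruijn/TAGGS | methods/sanitize.py | gramify
-- ===== SOURCE A (Python) =====
-- import string
--
-- def gramify(tokens, minimum, maximum):
--     assert minimum > 0
--     assert maximum >= minimum
--     if minimum == 1:
--         grams = set(gram for gram in tokens if not any(c in string.punctuation for c in gram))
--     else:
--         grams = set()
--     for n in range(max(minimum, 2), maximum+1):
--         for i in range(len(tokens)-n+1):
--             gram = ' '.join(tokens[i:i+n])
--             if not any(c in string.punctuation for c in gram):
--                 grams.add(gram)
--     return grams
-- ===== SOURCE B (Python) =====
-- import string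
--
-- def gramify(tokens, minimum, maximum):
--     assert minimum > 0
--     assert maximum >= minimum
--     punct = set(string.punctuation)
--     # prefix counts of punctuation-carrying tokens: bad[k] = #{j < k : tokens[j] has punctuation}
--     bad = [0]
--     c = 0
--     for t in tokens:
--         if any(ch in punct for ch in t):
--             c += 1
--         bad.append(c)
--     grams = set()
--     for n in range(minimum, maximum + 1):
--         for i in range(len(tokens) - n + 1):
--             if bad[i + n] == bad[i]:
--                 grams.add(' '.join(tokens[i:i + n]))
--     return grams
-- ===== Notes on version B (the rewrite author's own statement) =====
-- stated objective: faster
-- what changed: B precomputes one prefix-count array of punctuation-carrying tokens in a single pass, so each window is validated in O(1) and joined only when valid, replacing A's per-window join-then-rescan of every window's characters; the minimum==1 special branch also disappears into the uniform n-loop.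
import Mathlib
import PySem

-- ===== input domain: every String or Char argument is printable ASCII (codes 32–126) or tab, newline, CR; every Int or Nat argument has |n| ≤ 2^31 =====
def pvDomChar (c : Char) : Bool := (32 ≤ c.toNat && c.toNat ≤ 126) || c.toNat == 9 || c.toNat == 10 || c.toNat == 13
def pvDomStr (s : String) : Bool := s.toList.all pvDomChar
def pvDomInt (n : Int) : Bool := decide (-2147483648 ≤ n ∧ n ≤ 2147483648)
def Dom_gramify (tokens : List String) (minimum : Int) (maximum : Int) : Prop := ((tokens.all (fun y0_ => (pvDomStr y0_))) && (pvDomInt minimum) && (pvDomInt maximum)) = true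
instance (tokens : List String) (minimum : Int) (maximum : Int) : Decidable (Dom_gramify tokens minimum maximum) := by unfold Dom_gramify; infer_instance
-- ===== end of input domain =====

-- B replaces A's join-then-rescan of every candidate window by a one-pass prefix count of
-- punctuation-carrying tokens, validating each window in O(1) and joining only valid ones (faster).

-- ===== PORT A =====
-- string.punctuation
def pvPunct : List Char := "!\"#$%&'()*+,-./:;<=>?@[\\]^_`{|}~".toList

-- not any(c in string.punctuation for c in s)  — negated below at use sites
def pvHasPunct (s : String) : Bool := s.toList.any (fun c => pvPunct.contains c)

def gramify (tokens : List String) (minimum : Int) (maximum : Int) : List String :=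
  let grams : PySem.Set String :=
    if minimum = 1 then
      PySem.Set.ofList (tokens.filter (fun gram => !pvHasPunct gram))
    else PySem.Set.empty
  (PySem.List.pyRange (max minimum 2) (maximum + 1) 1).foldl (fun grams n =>
    (PySem.List.pyRange 0 ((tokens.length : Int) - n + 1) 1).foldl (fun grams i =>
      let gram := PySem.Str.join " " (PySem.List.slice tokens (some i) (some (i + n)))
      if !pvHasPunct gram then PySem.Set.add grams gram else grams) grams) grams

-- ===== PORT B =====
def gramify_alt (tokens : List String) (minimum : Int) (maximum : Int) : List String :=
  -- bad = [0]; c = 0; for t in tokens: if any(...): c += 1; bad.append(c)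
  let st : List Int × Int := tokens.foldl (fun (st : List Int × Int) t =>
      let c := if pvHasPunct t then st.2 + 1 else st.2
      (st.1 ++ [c], c)) ([0], 0)
  let bad := st.1
  (PySem.List.pyRange minimum (maximum + 1) 1).foldl (fun grams n =>
    (PySem.List.pyRange 0 ((tokens.length : Int) - n + 1) 1).foldl (fun grams i =>
      if PySem.List.pyGetD bad (i + n) 0 == PySem.List.pyGetD bad i 0 then
        PySem.Set.add grams (PySem.Str.join " " (PySem.List.slice tokens (some i) (some (i + n))))
      else grams) grams) PySem.Set.empty

-- ===== PRECONDITION & SPEC =====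
-- A (and B) assert minimum > 0 and maximum >= minimum; Pre_ excludes exactly the AssertionError inputs.
def Pre_gramify (tokens : List String) (minimum : Int) (maximum : Int) : Prop :=
  0 < minimum ∧ minimum ≤ maximum
instance (tokens : List String) (minimum : Int) (maximum : Int) : Decidable (Pre_gramify tokens minimum maximum) := by unfold Pre_gramify; infer_instance

def pvWitness_gramify : List String × Int × Int := (["hello", "world", "x.y"], 1, 2)

def Spec_gramify (tokens : List String) (minimum : Int) (maximum : Int) (out : List String) : Prop := out = gramify_alt tokens minimum maximum
instance (tokens : List String) (minimum : Int) (maximum : Int) (out : List String) : Decidable (Spec_gramify tokens minimum maximum out) := by unfold Spec_gramify; infer_instance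

-- ===== CLAIM (what is proved, stated in full; the proofs are below) =====
def Claim_equal_gramify : Prop := ∀ (tokens : List String) (minimum : Int) (maximum : Int), Dom_gramify tokens minimum maximum → Pre_gramify tokens minimum maximum → Spec_gramify tokens minimum maximum (gramify tokens minimum maximum)

-- ===== LEMMAS AND PROOFS =====

def pvCB (tokens : List String) (k : Nat) : Int :=
  ((tokens.take k).countP (fun t => pvHasPunct t) : Int)

theorem pvCB_cons (t : String) (ts : List String) (k : Nat) :
    pvCB (t :: ts) (k + 1) = (if pvHasPunct t then 1 else 0) + pvCB ts k := by
  simp [pvCB, List.countP_cons]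
  split <;> push_cast <;> ring

theorem pv_fold_bad (toks : List String) (l : List Int) (c : Int) :
    (toks.foldl (fun (st : List Int × Int) t =>
      let c := if pvHasPunct t then st.2 + 1 else st.2
      (st.1 ++ [c], c)) (l, c)) =
    (l ++ (List.range toks.length).map (fun k => c + pvCB toks (k + 1)), c + pvCB toks toks.length) := by
  induction toks generalizing l c with
  | nil => simp [pvCB]
  | cons t ts ih =>
    simp only [List.foldl_cons]
    rw [ih]
    refine Prod.ext ?_ ?_
    · show _ = l ++ List.map (fun k => c + pvCB (t :: ts) (k + 1)) (List.range (t :: ts).length)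
      rw [List.length_cons, List.range_succ_eq_map]
      simp only [List.map_cons, List.map_map, List.append_assoc, List.singleton_append]
      apply congrArg
      refine List.cons_eq_cons.mpr ⟨?_, ?_⟩
      · rw [pvCB_cons]
        have : pvCB ts 0 = 0 := by simp [pvCB]
        rw [this]; split <;> ring
      · apply List.map_congr_left
        intro k hk
        simp only [Function.comp, Nat.succ_eq_add_one]
        rw [pvCB_cons]
        split <;> ring
    · show _ = c + pvCB (t :: ts) (t :: ts).length
      rw [List.length_cons, pvCB_cons]
      split <;> ring

theorem pv_bad_eq (tokens : List String) :
    (tokens.foldl (fun (st : List Int × Int) t =>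
      let c := if pvHasPunct t then st.2 + 1 else st.2
      (st.1 ++ [c], c)) ([0], 0)).1 =
    (List.range (tokens.length + 1)).map (fun k => pvCB tokens k) := by
  rw [pv_fold_bad]
  simp only [List.range_succ_eq_map, List.map_cons, List.map_map]
  have h0 : pvCB tokens 0 = 0 := by simp [pvCB]
  simp [h0, Function.comp]

theorem pv_getD_bad (tokens : List String) (j : Int) (h0 : 0 ≤ j) (hj : j ≤ (tokens.length : Int)) :
    PySem.List.pyGetD ((List.range (tokens.length + 1)).map (fun k => pvCB tokens k)) j 0
      = pvCB tokens j.toNat := by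
  obtain ⟨m, rfl⟩ : ∃ m : Nat, j = (m : Int) := ⟨j.toNat, (Int.toNat_of_nonneg h0).symm⟩
  rw [PySem.List.pyGetD_natCast]
  have hm : m < tokens.length + 1 := by omega
  simp [List.getD_eq_getElem?_getD, hm]

theorem pv_hasPunct_join (ws : List String) :
    pvHasPunct (PySem.Str.join " " ws) = ws.any pvHasPunct := by
  have key : ∀ ps : List (List Char),
      (PySem.Chars.join [' '] ps).any (fun c => pvPunct.contains c)
        = ps.any (fun cs => cs.any (fun c => pvPunct.contains c)) := by
    intro ps
    induction ps with
    | nil => simp [PySem.Chars.join_nil]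
    | cons p rest ih =>
      cases rest with
      | nil => simp [PySem.Chars.join_singleton]
      | cons q r =>
        rw [PySem.Chars.join_cons_cons]
        simp only [List.any_append, List.any_cons] at *
        rw [ih]
        have hsp : decide (' ' ∈ pvPunct) = false := by decide
        simp [hsp]
  show (PySem.Str.join " " ws).toList.any _ = _
  rw [PySem.Str.toList_join]
  have : (" " : String).toList = [' '] := by decide
  rw [this, key]
  rw [List.any_map]
  rfl

def pvWin (tokens : List String) (n i : Int) : String :=
  PySem.Str.join " " (PySem.List.slice tokens (some i) (some (i + n)))

theorem pv_cond_eq (tokens : List String) (n i : Int) (hn : 0 < n) (h0 : 0 ≤ i)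
    (hi : i + n ≤ (tokens.length : Int)) :
    (pvCB tokens (i + n).toNat == pvCB tokens i.toNat) = !pvHasPunct (pvWin tokens n i) := by
  have hslice : PySem.List.slice tokens (some i) (some (i + n))
      = (tokens.drop i.toNat).take n.toNat := by
    rw [PySem.List.slice_toNat (xs := tokens) (a := i) (b := i+n) h0 (by omega)]
    congr 1
    omega
  have htake : tokens.take (i + n).toNat = tokens.take i.toNat ++ (tokens.drop i.toNat).take n.toNat := by
    have : (i + n).toNat = i.toNat + n.toNat := by omega
    rw [this, List.take_add]
  have hcb : pvCB tokens (i + n).toNat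
      = pvCB tokens i.toNat + (((tokens.drop i.toNat).take n.toNat).countP (fun t => pvHasPunct t) : Int) := by
    simp [pvCB, htake, List.countP_append]
  rw [pvWin, hslice, pv_hasPunct_join, hcb]
  rcases h : ((tokens.drop i.toNat).take n.toNat).any pvHasPunct with _ | _
  · -- no punctuation in window: count = 0
    have : ((tokens.drop i.toNat).take n.toNat).countP (fun t => pvHasPunct t) = 0 := by
      rw [List.countP_eq_zero]
      intro a ha
      have := List.any_eq_false.mp h a ha
      simpa using this
    simp [this]
  · -- some punctuation: count > 0
    obtain ⟨a, ha, hpa⟩ := List.any_eq_true.mp h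
    have : 0 < ((tokens.drop i.toNat).take n.toNat).countP (fun t => pvHasPunct t) := by
      rw [List.countP_pos_iff]
      exact ⟨a, ha, by simpa using hpa⟩
    simp only [Bool.not_true, beq_eq_false_iff_ne, ne_eq]
    omega

theorem pv_foldl_add_if {α β : Type} [BEq β] (l : List α) (p : α → Bool) (f : α → β) (s : PySem.Set β) :
    l.foldl (fun s x => if p x then PySem.Set.add s (f x) else s) s
      = PySem.Set.update s ((l.filter p).map f) := by
  induction l generalizing s with
  | nil => simp [PySem.Set.update]
  | cons x xs ih =>
    simp only [List.foldl_cons, List.filter_cons]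
    rcases h : p x with _ | _
    · simp [h, ih]
    · simp [h, ih, PySem.Set.update_cons]

theorem pv_foldl_update {α β : Type} [BEq β] (ns : List α) (L : α → List β) (s : PySem.Set β) :
    ns.foldl (fun s n => PySem.Set.update s (L n)) s = PySem.Set.update s (ns.flatMap L) := by
  induction ns generalizing s with
  | nil => simp [PySem.Set.update]
  | cons n ns ih => simp [ih, PySem.Set.update_append]

theorem pv_Ln_eq (tokens : List String) (n : Int) (hn : 0 < n) :
    ((PySem.List.pyRange 0 ((tokens.length : Int) - n + 1) 1).filter
        (fun i => PySem.List.pyGetD ((List.range (tokens.length + 1)).map (fun k => pvCB tokens k)) (i + n) 0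
          == PySem.List.pyGetD ((List.range (tokens.length + 1)).map (fun k => pvCB tokens k)) i 0)).map (pvWin tokens n)
      = ((PySem.List.pyRange 0 ((tokens.length : Int) - n + 1) 1).filter
        (fun i => !pvHasPunct (pvWin tokens n i))).map (pvWin tokens n) := by
  congr 1
  apply List.filter_congr
  intro i hi
  rw [PySem.List.mem_pyRange_one] at hi
  obtain ⟨h0, hlt⟩ := hi
  have hin : i + n ≤ (tokens.length : Int) := by omega
  rw [pv_getD_bad tokens (i+n) (by omega) hin, pv_getD_bad tokens i h0 (by omega)]
  exact pv_cond_eq tokens n i hn h0 hin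

theorem pv_L1 (tokens : List String) :
    ((PySem.List.pyRange 0 ((tokens.length : Int) - 1 + 1) 1).filter
        (fun i => !pvHasPunct (pvWin tokens 1 i))).map (pvWin tokens 1)
      = tokens.filter (fun g => !pvHasPunct g) := by
  have hr : (tokens.length : Int) - 1 + 1 = (tokens.length : Int) := by ring
  rw [hr]
  have hwin : ∀ i ∈ PySem.List.pyRange 0 (tokens.length : Int) 1,
      pvWin tokens 1 i = PySem.List.pyGetD tokens i "" := by
    intro i hi
    rw [PySem.List.mem_pyRange_one] at hi
    obtain ⟨h0, hlt⟩ := hi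
    have hslice : PySem.List.slice tokens (some i) (some (i + 1))
        = [tokens.get ⟨i.toNat, by omega⟩] := by
      rw [PySem.List.slice_toNat (xs := tokens) (a := i) (b := i+1) h0 (by omega)]
      have h1 : (i+1).toNat - i.toNat = 1 := by omega
      rw [h1]
      rw [List.take_one, List.head?_drop]
      simp [List.getElem?_eq_getElem (by omega : i.toNat < tokens.length)]
    rw [pvWin, hslice]
    have : PySem.Str.join " " [tokens.get ⟨i.toNat, by omega⟩] = tokens.get ⟨i.toNat, by omega⟩ := by
      apply String.toList_inj.mp
      rw [PySem.Str.toList_join]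
      simp [PySem.Chars.join_singleton]
    rw [this]
    rw [PySem.List.pyGetD_of_nonneg tokens "" h0]
    simp [List.getD_eq_getElem?_getD, List.getElem?_eq_getElem (by omega : i.toNat < tokens.length)]
  calc ((PySem.List.pyRange 0 (tokens.length : Int) 1).filter (fun i => !pvHasPunct (pvWin tokens 1 i))).map (pvWin tokens 1)
      = ((PySem.List.pyRange 0 (tokens.length : Int) 1).filter (fun i => !pvHasPunct (PySem.List.pyGetD tokens i ""))).map (fun i => PySem.List.pyGetD tokens i "") := by
        rw [List.filter_congr (fun i hi => by rw [hwin i hi])]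
        apply List.map_congr_left
        intro i hi
        exact hwin i (List.mem_of_mem_filter hi)
    _ = ((PySem.List.pyRange 0 (tokens.length : Int) 1).map (fun i => PySem.List.pyGetD tokens i "")).filter (fun g => !pvHasPunct g) := by
        rw [List.filter_map]
        rfl
    _ = tokens.filter (fun g => !pvHasPunct g) := by
        rw [PySem.List.map_pyGetD_pyRange_zero' tokens ""]

theorem pv_main (tokens : List String) (minimum maximum : Int)
    (hmin : 0 < minimum) (hmax : minimum ≤ maximum) :
    gramify tokens minimum maximum = gramify_alt tokens minimum maximum := by
  have L : Int → List String := fun n =>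
    ((PySem.List.pyRange 0 ((tokens.length : Int) - n + 1) 1).filter
      (fun i => !pvHasPunct (pvWin tokens n i))).map (pvWin tokens n)
  have hA : gramify tokens minimum maximum =
      PySem.Set.update
        (if minimum = 1 then PySem.Set.ofList (tokens.filter (fun g => !pvHasPunct g)) else PySem.Set.empty)
        ((PySem.List.pyRange (max minimum 2) (maximum + 1) 1).flatMap (fun n =>
          ((PySem.List.pyRange 0 ((tokens.length : Int) - n + 1) 1).filter
            (fun i => !pvHasPunct (pvWin tokens n i))).map (pvWin tokens n))) := by
    unfold gramify
    rw [← pv_foldl_update]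
    apply PySem.List.foldl_congr_mem
    intro acc n _
    exact pv_foldl_add_if _ (fun i => !pvHasPunct (pvWin tokens n i)) (pvWin tokens n) acc
  have hB : gramify_alt tokens minimum maximum =
      PySem.Set.update PySem.Set.empty
        ((PySem.List.pyRange minimum (maximum + 1) 1).flatMap (fun n =>
          ((PySem.List.pyRange 0 ((tokens.length : Int) - n + 1) 1).filter
            (fun i => !pvHasPunct (pvWin tokens n i))).map (pvWin tokens n))) := by
    unfold gramify_alt
    simp only [pv_bad_eq]
    rw [← pv_foldl_update]
    apply PySem.List.foldl_congr_mem
    intro acc n hn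
    rw [PySem.List.mem_pyRange_one] at hn
    refine Eq.trans ?_ (congrArg (PySem.Set.update acc) (pv_Ln_eq tokens n (by omega)))
    exact pv_foldl_add_if _ (fun i =>
        PySem.List.pyGetD ((List.range (tokens.length + 1)).map (fun k => pvCB tokens k)) (i + n) 0
          == PySem.List.pyGetD ((List.range (tokens.length + 1)).map (fun k => pvCB tokens k)) i 0)
        (pvWin tokens n) acc
  rw [hA, hB]
  by_cases h1 : minimum = 1
  · subst h1
    have hm2 : max (1:Int) 2 = 2 := by omega
    have hsplit : PySem.List.pyRange 1 (maximum + 1) 1 = 1 :: PySem.List.pyRange 2 (maximum + 1) 1 :=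
      PySem.List.pyRange_one_cons (by omega)
    rw [hm2, if_pos rfl, hsplit, List.flatMap_cons, PySem.Set.update_append, PySem.Set.update_empty]
    congr 1
    rw [pv_L1]
  · have hm2 : max minimum 2 = minimum := by omega
    rw [hm2, if_neg h1]

-- ===== VERDICT (by name: the statement is the Claim_ definition above) =====
theorem gramify_spec : Claim_equal_gramify := by
  intro tokens minimum maximum _ hpre
  exact pv_main tokens minimum maximum hpre.1 hpre.2
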